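-- pv_equiv track=rewrite | github.com/Ayushkaundal27/DES_Algo | cryptogrsphy_algorithms/aes_functions/to_bytes_convertion.py | data_to_bytes_arr
-- ===== SOURCE A (Python) =====
-- def chr_to_hex(data):
--     return hex(ord(data))
--
-- def data_to_bytes_arr(data):
--     result = []
--     data_in_16B_str_arr = []
--     row_temp_arr=[]
--     temp_hex_4x4_arr=[]
--     for i in range(0,len(data),16):
--         if len(data[i:i+16])==16:
--             data_in_16B_str_arr.append(data[i:i+16])
--         if len(data[i:i+16]) <16:
--             diff = 16-len(data[i:i+16])
--             data_with_padding= data[i:i+16] + str(" "*diff)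
--             data_in_16B_str_arr.append(data_with_padding)
--     for i in range(len(data_in_16B_str_arr)):
--         for j in range(len(data_in_16B_str_arr[i])):
--             row_temp_arr.append(chr_to_hex(data_in_16B_str_arr[i][j]))
--             if len(row_temp_arr) == 4 :
--                 temp_hex_4x4_arr.append(row_temp_arr)
--                 row_temp_arr = []
--             if len(temp_hex_4x4_arr) == 4 :
--                 result.append(temp_hex_4x4_arr)
--                 temp_hex_4x4_arr = []
--     return result
-- ===== SOURCE B (Python) =====
-- def data_to_bytes_arr(data):
--     # pad once to a multiple of 16, then reshape by direct indexing
--     blocks = (len(data) + 15) // 16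
--     padded = data + " " * (blocks * 16 - len(data))
--     return [[[hex(ord(padded[b * 16 + r * 4 + c])) for c in range(4)]
--              for r in range(4)]
--             for b in range(blocks)]
-- ===== Notes on version B (the rewrite author's own statement) =====
-- stated objective: simpler
-- what changed: Replaces the two-pass accumulator state machine (chunk list + row/grid counters with length==4 resets) by a single pad-to-multiple-of-16 step followed by a nested comprehension that reads each hex cell by direct positional indexing padded[b*16+r*4+c].
import Mathlib
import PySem

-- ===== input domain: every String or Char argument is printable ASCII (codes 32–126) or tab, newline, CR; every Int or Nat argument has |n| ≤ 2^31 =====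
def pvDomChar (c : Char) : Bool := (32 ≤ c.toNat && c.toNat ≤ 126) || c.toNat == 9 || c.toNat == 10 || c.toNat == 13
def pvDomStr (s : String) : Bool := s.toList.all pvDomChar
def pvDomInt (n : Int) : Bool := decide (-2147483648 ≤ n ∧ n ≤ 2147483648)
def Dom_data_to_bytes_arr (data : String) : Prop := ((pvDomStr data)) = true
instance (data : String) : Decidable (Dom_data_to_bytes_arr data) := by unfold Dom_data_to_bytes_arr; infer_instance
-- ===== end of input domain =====

-- B replaces A's two-pass accumulator state machine by one pad-to-multiple-of-16 step and a
-- nested comprehension reading each cell by direct positional indexing (objective: simpler).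

-- ===== PORT A =====
-- hex(ord(c)): exact for ord(c) ≥ 0 (Nat.toDigits 16 produces Python's lowercase hex digits)
def chr_to_hex (c : Char) : String := "0x" ++ String.ofList (Nat.toDigits 16 c.toNat)

-- one iteration of A's inner character loop (append hex, the two length==4 reset checks)
def pvStepA (st : List (List (List String)) × List (List String) × List String) (c : Char) :
    List (List (List String)) × List (List String) × List String :=
  let row := st.2.2 ++ [chr_to_hex c]
  let p := if row.length = 4 then (st.2.1 ++ [row], ([] : List String)) else (st.2.1, row)
  let q := if p.1.length = 4 then (st.1 ++ [p.1], ([] : List (List String))) else (st.1, p.1)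
  (q.1, q.2, p.2)

-- A's first loop: for i in range(0, len(data), 16): append the (padded) 16-char slice
def pvChunksA (l : List Char) : List (List Char) :=
  (PySem.List.pyRange 0 (l.length : Int) 16).foldl (fun acc i =>
    let s := PySem.List.slice l (some i) (some (i + 16))
    let acc := if s.length = 16 then acc ++ [s] else acc
    if s.length < 16 then acc ++ [s ++ List.replicate (16 - s.length) ' '] else acc) []

def data_to_bytes_arr (data : String) : List (List (List String)) :=
  let chunks := pvChunksA data.toList
  let st := (PySem.List.pyRange 0 (chunks.length : Int)).foldl (fun st i =>
    let ch := PySem.List.pyGetD chunks i []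
    (PySem.List.pyRange 0 (ch.length : Int)).foldl
      (fun st j => pvStepA st (PySem.List.pyGetD ch j ' ')) st)
    (([], [], []) : List (List (List String)) × List (List String) × List String)
  st.1

-- ===== PORT B =====
def data_to_bytes_arr_alt (data : String) : List (List (List String)) :=
  let l := data.toList
  let blocks := (l.length + 15) / 16
  let padded := l ++ List.replicate (blocks * 16 - l.length) ' '
  (List.range blocks).map fun b =>
    (List.range 4).map fun r =>
      (List.range 4).map fun c => chr_to_hex (padded.getD (b * 16 + r * 4 + c) ' ')

-- ===== PRECONDITION & SPEC =====
def Spec_data_to_bytes_arr (data : String) (out : List (List (List String))) : Prop := out = data_to_bytes_arr_alt data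
instance (data : String) (out : List (List (List String))) : Decidable (Spec_data_to_bytes_arr data out) := by unfold Spec_data_to_bytes_arr; infer_instance

-- ===== CLAIM (what is proved, stated in full; the proofs are below) =====
def Claim_equal_data_to_bytes_arr : Prop := ∀ (data : String), Dom_data_to_bytes_arr data → Spec_data_to_bytes_arr data (data_to_bytes_arr data)

-- ===== LEMMAS AND PROOFS =====

-- the padded data and block count, shared by the proofs
def pvPadded (l : List Char) : List Char := l ++ List.replicate (((l.length + 15) / 16) * 16 - l.length) ' '

-- the 4x4 grid read out of one 16-char chunk
def pvGridOf (ch : List Char) : List (List String) :=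
  (List.range 4).map fun r => (List.range 4).map fun c => chr_to_hex (ch.getD (r * 4 + c) ' ')

lemma pvPadded_length (l : List Char) : (pvPadded l).length = ((l.length + 15) / 16) * 16 := by
  simp [pvPadded]; omega

-- A's padded slice at block k equals the plain 16-char window of the padded data
lemma pv_chunk_pad (l : List Char) (k : Nat) (hk : k < (l.length + 15) / 16) :
    ((pvPadded l).drop (k * 16)).take 16 =
      (l.drop (k * 16)).take 16 ++ List.replicate (16 - ((l.drop (k * 16)).take 16).length) ' ' := by
  have hkn : k * 16 < l.length := by omega
  rw [pvPadded, List.drop_append, List.take_append, List.drop_replicate, List.take_replicate]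
  congr 1
  simp only [List.length_take, List.length_drop]
  congr 1
  omega

-- A's chunk loop builds exactly the 16-char windows of the padded data
lemma pv_chunksA_eq (l : List Char) :
    pvChunksA l = (List.range ((l.length + 15) / 16)).map (fun k => ((pvPadded l).drop (k * 16)).take 16) := by
  unfold pvChunksA
  rw [PySem.List.pyRange_of_pos 0 (l.length : Int) (by norm_num)]
  have hcount : (if (0 : Int) < (l.length : Int) then ((((l.length : Int)) - 0 + 16 - 1) / 16).toNat else 0)
      = (l.length + 15) / 16 := by
    split_ifs with h <;> omega
  rw [hcount, List.foldl_map]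
  have hbody : List.foldl
      (fun acc (k : Nat) =>
        let s := PySem.List.slice l (some (0 + 16 * (k : Int))) (some (0 + 16 * (k : Int) + 16))
        let acc := if s.length = 16 then acc ++ [s] else acc
        if s.length < 16 then acc ++ [s ++ List.replicate (16 - s.length) ' '] else acc)
      [] (List.range ((l.length + 15) / 16))
      = List.foldl (fun acc k => acc ++ [((pvPadded l).drop (k * 16)).take 16])
          [] (List.range ((l.length + 15) / 16)) := by
    apply PySem.List.foldl_congr_mem
    intro acc k hk
    have hk' : k < (l.length + 15) / 16 := List.mem_range.mp hk
    have hs : PySem.List.slice l (some (16 * (k : Int))) (some (16 * (k : Int) + 16))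
        = (l.drop (k * 16)).take 16 := by
      have h := PySem.List.slice_natCast_add l (k * 16) 16
      have e : ((k * 16 : Nat) : Int) = 16 * (k : Int) := by push_cast; ring
      rw [e] at h
      simpa using h
    rw [pv_chunk_pad l k hk']
    by_cases hc : 16 ≤ l.length - k * 16
    · simp [hs, hc]
    · simp [hs, hc]
  rw [hbody, PySem.List.foldl_append_singleton_eq_map]
  simp

-- running A's character state machine through one full 16-char chunk appends its 4x4 grid
lemma pv_fold16 (ch : List Char) (h : ch.length = 16) (res : List (List (List String))) :
    ch.foldl pvStepA (res, [], []) = (res ++ [pvGridOf ch], [], []) := by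
  rcases ch with _ | ⟨a0, ch⟩; · simp at h
  rcases ch with _ | ⟨a1, ch⟩; · simp at h
  rcases ch with _ | ⟨a2, ch⟩; · simp at h
  rcases ch with _ | ⟨a3, ch⟩; · simp at h
  rcases ch with _ | ⟨a4, ch⟩; · simp at h
  rcases ch with _ | ⟨a5, ch⟩; · simp at h
  rcases ch with _ | ⟨a6, ch⟩; · simp at h
  rcases ch with _ | ⟨a7, ch⟩; · simp at h
  rcases ch with _ | ⟨a8, ch⟩; · simp at h
  rcases ch with _ | ⟨a9, ch⟩; · simp at h
  rcases ch with _ | ⟨a10, ch⟩; · simp at h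
  rcases ch with _ | ⟨a11, ch⟩; · simp at h
  rcases ch with _ | ⟨a12, ch⟩; · simp at h
  rcases ch with _ | ⟨a13, ch⟩; · simp at h
  rcases ch with _ | ⟨a14, ch⟩; · simp at h
  rcases ch with _ | ⟨a15, ch⟩; · simp at h
  rcases ch with _ | ⟨a16, ch⟩
  · simp [pvStepA, pvGridOf, List.range_succ, List.getD]
  · simp at h

-- running the state machine over a list of 16-char chunks appends one grid per chunk
lemma pv_foldChunks (cs : List (List Char)) (hall : ∀ ch ∈ cs, ch.length = 16)
    (res : List (List (List String))) :
    cs.foldl (fun st ch => ch.foldl pvStepA st) (res, [], []) = (res ++ cs.map pvGridOf, [], []) := by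
  induction cs generalizing res with
  | nil => simp
  | cons c cs ih =>
    have hc : c.length = 16 := hall c (by simp)
    simp only [List.foldl_cons, pv_fold16 c hc res]
    rw [ih (fun ch h => hall ch (by simp [h])) (res ++ [pvGridOf c])]
    simp

-- reading the grid from a 16-char window of padded data is direct indexing into padded data
lemma pv_grid_window (p : List Char) (k : Nat) :
    pvGridOf ((p.drop (k * 16)).take 16)
      = (List.range 4).map fun r => (List.range 4).map fun c => chr_to_hex (p.getD (k * 16 + r * 4 + c) ' ') := by
  unfold pvGridOf
  apply List.map_congr_left
  intro r hr
  apply List.map_congr_left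
  intro c hc
  have hr4 := List.mem_range.mp hr
  have hc4 := List.mem_range.mp hc
  congr 1
  rw [List.getD_eq_getElem?_getD, List.getD_eq_getElem?_getD, List.getElem?_take]
  have h16 : r * 4 + c < 16 := by omega
  rw [if_pos h16, List.getElem?_drop]
  have hidx : k * 16 + (r * 4 + c) = k * 16 + r * 4 + c := by omega
  rw [hidx]

-- ===== VERDICT (by name: the statement is the Claim_ definition above) =====
theorem data_to_bytes_arr_spec : Claim_equal_data_to_bytes_arr := by
  intro data _
  unfold Spec_data_to_bytes_arr data_to_bytes_arr data_to_bytes_arr_alt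
  set l := data.toList with hl
  have houter := PySem.List.foldl_pyRange_zero_pyGetD' (pvChunksA l) ([] : List Char)
    (fun st ch => (PySem.List.pyRange 0 (ch.length : Int)).foldl
      (fun st j => pvStepA st (PySem.List.pyGetD ch j ' ')) st)
    (([], [], []) : List (List (List String)) × List (List String) × List String)
  simp only [houter]
  have hinner : (pvChunksA l).foldl (fun st ch =>
      (PySem.List.pyRange 0 (ch.length : Int)).foldl
        (fun st j => pvStepA st (PySem.List.pyGetD ch j ' ')) st) ([], [], [])
      = (pvChunksA l).foldl (fun st ch => ch.foldl pvStepA st) ([], [], []) := by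
    apply PySem.List.foldl_congr_mem
    intro st ch _
    exact PySem.List.foldl_pyRange_zero_pyGetD' ch ' ' pvStepA st
  rw [hinner, pv_chunksA_eq l]
  have hpadlen := pvPadded_length l
  have hall : ∀ ch ∈ (List.range ((l.length + 15) / 16)).map
      (fun k => ((pvPadded l).drop (k * 16)).take 16), ch.length = 16 := by
    intro ch hch
    obtain ⟨k, hk, rfl⟩ := List.mem_map.mp hch
    have hk' := List.mem_range.mp hk
    simp [List.length_take, List.length_drop, hpadlen]
    omega
  rw [pv_foldChunks _ hall []]
  simp only [List.nil_append, List.map_map]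
  apply List.map_congr_left
  intro k hk
  have hk' := List.mem_range.mp hk
  have := pv_grid_window (pvPadded l) k
  simpa [pvPadded] using this
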